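-- pv_equiv track=rewrite | github.com/typingbugs/WSRS_homework | data_preprocess/build_pretrained_embeddings/retrieve_external_data/steam.py | delete_platform_info
-- ===== SOURCE A (Python) =====
-- def delete_platform_info(title: str):
--     platform_info = [
--         ' - Xbox',
--         ' - PlayStation',
--         ' - PS',
--         ' - PC',
--         ' - Nintendo',
--         ' - Sega'
--     ]
--     for platform in platform_info:
--         index = title.find(platform)
--         if index != -1:
--             title = title[:index]
--     return title.strip()
-- ===== SOURCE B (Python) =====
-- def delete_platform_info(title: str):
--     platform_info = [
--         ' - Xbox',
--         ' - PlayStation',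
--         ' - PS',
--         ' - PC',
--         ' - Nintendo',
--         ' - Sega'
--     ]
--     cuts = [i for i in (title.find(p) for p in platform_info) if i != -1]
--     cut = min(cuts, default=len(title))
--     return title[:cut].strip()
-- ===== Notes on version B (the rewrite author's own statement) =====
-- stated objective: idiomatic
-- what changed: Instead of A's repeated find-and-truncate loop that mutates the title per platform, B computes the indices of all platform occurrences in the original title in one comprehension, cuts once at the leftmost one (min with default len), and strips.
import Mathlib
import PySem

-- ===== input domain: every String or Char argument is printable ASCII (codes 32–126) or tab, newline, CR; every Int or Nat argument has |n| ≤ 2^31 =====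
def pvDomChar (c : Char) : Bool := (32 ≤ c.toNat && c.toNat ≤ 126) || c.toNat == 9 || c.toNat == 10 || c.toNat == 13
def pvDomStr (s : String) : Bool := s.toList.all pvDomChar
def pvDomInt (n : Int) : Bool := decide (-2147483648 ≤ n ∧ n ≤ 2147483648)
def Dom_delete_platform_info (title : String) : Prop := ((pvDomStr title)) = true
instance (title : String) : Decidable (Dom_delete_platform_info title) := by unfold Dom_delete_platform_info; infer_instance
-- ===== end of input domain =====

-- B replaces A's repeated find-and-truncate loop by one cut at the leftmost platform occurrence (min of the find indices); same values, idiomatic single-cut form.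

-- ===== PORT A =====
def pvPlatforms : List String :=
  [" - Xbox", " - PlayStation", " - PS", " - PC", " - Nintendo", " - Sega"]

def delete_platform_info (title : String) : String :=
  PySem.Str.strip (pvPlatforms.foldl (fun t platform =>
    let index := PySem.Str.find t platform
    if index ≠ -1 then PySem.Str.slice t none (some index) else t) title)

-- ===== PORT B =====
def pvPlatformsAlt : List String :=
  [" - Xbox", " - PlayStation", " - PS", " - PC", " - Nintendo", " - Sega"]

def delete_platform_info_alt (title : String) : String :=
  let cuts := (pvPlatformsAlt.map (fun p => PySem.Str.find title p)).filter (fun i => i != -1)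
  let cut := PySem.List.minD cuts (fun i => i) (PySem.Str.len title)
  PySem.Str.strip (PySem.Str.slice title none (some cut))

-- ===== PRECONDITION & SPEC =====
def Spec_delete_platform_info (title : String) (out : String) : Prop := out = delete_platform_info_alt title
instance (title : String) (out : String) : Decidable (Spec_delete_platform_info title out) := by unfold Spec_delete_platform_info; infer_instance

-- ===== CLAIM (what is proved, stated in full; the proofs are below) =====
def Claim_equal_delete_platform_info : Prop := ∀ (title : String), Dom_delete_platform_info title → Spec_delete_platform_info title (delete_platform_info title)

-- ===== LEMMAS AND PROOFS =====

-- list-level step of A's loop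
def pvStepL (t p : List Char) : List Char :=
  let i := PySem.Chars.find t p
  if i ≠ -1 then PySem.List.slice t none (some i) else t

-- running minimum of the (valid) find indices, as a Nat fold
def pvGcut (t : List Char) (ps : List (List Char)) (d : Nat) : Nat :=
  ps.foldl (fun j p => if 0 ≤ PySem.Chars.find t p then min j (PySem.Chars.find t p).toNat else j) d

-- an occurrence of b never starts strictly inside an occurrence of a
def pvNoOv (a b : List Char) : Prop := ∀ (t : List Char) (i j : Nat),
  a <+: t.drop i → b <+: t.drop j → i < j → j < i + a.length → False

-- decidable sufficient condition for pvNoOv (checks the first two chars of b against a's interior)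
def pvOvOk (a b : List Char) : Bool := decide (∀ d, d < a.length → 0 < d →
  ¬(a.getD d ' ' = b.getD 0 ' ' ∧ (d + 1 < a.length → a.getD (d+1) ' ' = b.getD 1 ' ')))

lemma pvPrefix_getD {a t : List Char} {i : Nat} (h : a <+: t.drop i) (k : Nat) (hk : k < a.length) :
    a.getD k ' ' = t.getD (i + k) ' ' := by
  have hlen : a.length ≤ (t.drop i).length := h.length_le
  simp only [List.length_drop] at hlen
  have hk3 : i + k < t.length := by omega
  have hk2 : k < (t.drop i).length := by simp [List.length_drop]; omega
  rw [List.getD_eq_getElem a ' ' hk, List.getD_eq_getElem t ' ' hk3]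
  rw [h.getElem hk]
  simp [List.getElem_drop]

lemma pvNoOv_of (a b : List Char) (hb : 2 ≤ b.length) (h : pvOvOk a b = true) : pvNoOv a b := by
  intro t i j hpa hpb hij hlt
  have hd0 : 0 < j - i := by omega
  have hdl : j - i < a.length := by omega
  have e1 : a.getD (j - i) ' ' = t.getD (i + (j - i)) ' ' := pvPrefix_getD hpa _ hdl
  have e2 : b.getD 0 ' ' = t.getD (j + 0) ' ' := pvPrefix_getD hpb 0 (by omega)
  simp only [pvOvOk, decide_eq_true_eq] at h
  refine h (j - i) hdl hd0 ⟨?_, ?_⟩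
  · rw [e1, e2]; congr 1; omega
  · intro hdl2
    have e3 : a.getD (j - i + 1) ' ' = t.getD (i + (j - i + 1)) ' ' := pvPrefix_getD hpa _ hdl2
    have e4 : b.getD 1 ' ' = t.getD (j + 1) ' ' := pvPrefix_getD hpb 1 (by omega)
    rw [e3, e4]; congr 1; omega

lemma pvFind_eq_of (s sub : List Char) (n : Nat) (hocc : sub <+: s.drop n)
    (hmin : ∀ i, i < n → ¬ sub <+: s.drop i) : PySem.Chars.find s sub = n := by
  have hinf : sub <:+: s := hocc.isInfix.trans (List.drop_suffix n s).isInfix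
  have h0 : 0 ≤ PySem.Chars.find s sub := (PySem.Chars.find_nonneg_iff s sub).mpr hinf
  obtain ⟨hocc', hmin'⟩ := PySem.Chars.find_spec h0
  have h1 : ¬ (PySem.Chars.find s sub).toNat < n := fun hl => hmin _ hl hocc'
  have h2 : ¬ n < (PySem.Chars.find s sub).toNat := fun hl => hmin' n hl hocc
  omega

-- find in a prefix: the first occurrence survives iff it fits entirely
lemma pvFind_take (t sub : List Char) (j : Nat) :
    PySem.Chars.find (t.take j) sub =
      if 0 ≤ PySem.Chars.find t sub ∧ (PySem.Chars.find t sub).toNat + sub.length ≤ j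
      then PySem.Chars.find t sub else -1 := by
  by_cases hsub : sub = []
  · simp [hsub, PySem.Chars.find_nil]
  have hslen : 0 < sub.length := List.length_pos_of_ne_nil hsub
  by_cases h0 : 0 ≤ PySem.Chars.find t sub
  · obtain ⟨hocc, hmin⟩ := PySem.Chars.find_spec h0
    by_cases hfit : (PySem.Chars.find t sub).toNat + sub.length ≤ j
    · rw [if_pos ⟨h0, hfit⟩]
      have hocc' : sub <+: (t.take j).drop (PySem.Chars.find t sub).toNat := by
        rw [List.drop_take]
        exact List.prefix_take_iff.mpr ⟨hocc, by omega⟩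
      have hmin' : ∀ i, i < (PySem.Chars.find t sub).toNat → ¬ sub <+: (t.take j).drop i := by
        intro i hi hpre
        refine hmin i hi (hpre.trans ?_)
        rw [List.drop_take]; exact List.take_prefix _ _
      rw [pvFind_eq_of (t.take j) sub _ hocc' hmin']
      omega
    · rw [if_neg (by tauto), PySem.Chars.find_eq_neg_one_iff]
      intro hinf
      obtain ⟨i, hpre⟩ := (PySem.Chars.exists_prefix_drop_iff_isIn sub (t.take j)).mpr
        ((PySem.Chars.isIn_iff_infix sub (t.take j)).mpr hinf)
      have hlen : sub.length ≤ ((t.take j).drop i).length := hpre.length_le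
      simp only [List.length_drop, List.length_take] at hlen
      have hocc_len : sub.length ≤ (t.drop (PySem.Chars.find t sub).toNat).length := hocc.length_le
      simp only [List.length_drop] at hocc_len
      have hFle := PySem.Chars.find_le_length t sub
      have hpre_t : sub <+: t.drop i := by
        refine hpre.trans ?_
        rw [List.drop_take]; exact List.take_prefix _ _
      exact hmin i (by omega) hpre_t
  · have hne : ¬ sub <:+: t := fun hinf => h0 ((PySem.Chars.find_nonneg_iff t sub).mpr hinf)
    rw [if_neg (by tauto), PySem.Chars.find_eq_neg_one_iff]
    intro hinf
    exact hne (hinf.trans (List.take_prefix j t).isInfix)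

lemma pvGcut_le (t : List Char) : ∀ (ps : List (List Char)) (d : Nat), pvGcut t ps d ≤ d := by
  intro ps
  induction ps with
  | nil => intro d; exact le_rfl
  | cons p ps ih =>
    intro d
    simp only [pvGcut, List.foldl_cons] at *
    refine le_trans (ih _) ?_
    split_ifs <;> omega

-- cutting t at j1 (the length, or the start of an occurrence of p0) does not change the running minimum
lemma pvGcut_take (t p0 : List Char) (j1 : Nat)
    (hj1 : j1 = t.length ∨ p0 <+: t.drop j1) :
    ∀ (ps : List (List Char)), (∀ q ∈ ps, pvNoOv q p0) →
    ∀ j, j ≤ j1 → pvGcut (t.take j1) ps j = pvGcut t ps j := by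
  intro ps
  induction ps with
  | nil => intro _ j _; rfl
  | cons q ps ih =>
    intro hq j hj
    have hq0 : pvNoOv q p0 := hq q (by simp)
    have hq' : ∀ r ∈ ps, pvNoOv r p0 := fun r hr => hq r (by simp [hr])
    have hft := pvFind_take t q j1
    simp only [pvGcut, List.foldl_cons] at *
    by_cases hcase : 0 ≤ PySem.Chars.find t q ∧ (PySem.Chars.find t q).toNat + q.length ≤ j1
    · rw [if_pos hcase] at hft
      rw [hft, if_pos hcase.1]
      refine ih hq' _ ?_
      omega
    · rw [if_neg hcase] at hft
      rw [hft, if_neg (by norm_num)]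
      by_cases h0 : 0 ≤ PySem.Chars.find t q
      · obtain ⟨hocc, _⟩ := PySem.Chars.find_spec h0
        have hnf : j1 < (PySem.Chars.find t q).toNat + q.length := by
          rcases not_and_or.mp hcase with h | h
          · exact absurd h0 h
          · omega
        have hlen : q.length ≤ (t.drop (PySem.Chars.find t q).toNat).length := hocc.length_le
        simp only [List.length_drop] at hlen
        have hFle := PySem.Chars.find_le_length t q
        have hge : j1 ≤ (PySem.Chars.find t q).toNat := by
          rcases hj1 with h | h
          · omega
          · by_contra hlt2
            exact hq0 t (PySem.Chars.find t q).toNat j1 hocc h (by omega) (by omega)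
        rw [if_pos h0, min_eq_left (by omega)]
        exact ih hq' j hj
      · rw [if_neg h0]
        exact ih hq' j hj

-- A's loop computes the single cut at the running minimum of the find indices
lemma pvFoldA_eq_take : ∀ (ps : List (List Char)) (t : List Char),
    (∀ a ∈ ps, ∀ b ∈ ps, pvNoOv a b) →
    ps.foldl pvStepL t = t.take (pvGcut t ps t.length) := by
  intro ps
  induction ps with
  | nil => intro t _; simp [pvGcut]
  | cons p ps ih =>
    intro t h
    have h' : ∀ a ∈ ps, ∀ b ∈ ps, pvNoOv a b := fun a ha b hb => h a (by simp [ha]) b (by simp [hb])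
    have hqp : ∀ q ∈ ps, pvNoOv q p := fun q hqm => h q (by simp [hqm]) p (by simp)
    rw [List.foldl_cons]
    by_cases h0 : 0 ≤ PySem.Chars.find t p
    · have hne : PySem.Chars.find t p ≠ -1 := by omega
      have hstep : pvStepL t p = t.take (PySem.Chars.find t p).toNat := by
        simp [pvStepL, hne, PySem.List.slice_to _ h0]
      have hFle : (PySem.Chars.find t p).toNat ≤ t.length := by
        have := PySem.Chars.find_le_length t p; omega
      rw [hstep, ih _ h']
      have hlen : (t.take (PySem.Chars.find t p).toNat).length = (PySem.Chars.find t p).toNat := by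
        simp [hFle]
      rw [hlen]
      rw [pvGcut_take t p _ (Or.inr (PySem.Chars.find_spec h0).1) ps hqp _ le_rfl]
      rw [List.take_take, min_eq_left (pvGcut_le t ps _)]
      simp only [pvGcut, List.foldl_cons, if_pos h0]
      rw [min_eq_right hFle]
    · have heq : PySem.Chars.find t p = -1 := by
        have := PySem.Chars.neg_one_le_find t p; omega
      have hstep : pvStepL t p = t := by simp [pvStepL, heq]
      rw [hstep, ih _ h']
      simp only [pvGcut, List.foldl_cons, if_neg h0]

-- the Nat fold of minima is the Int fold over the filtered find list
lemma pvGcut_foldl_min (t : List Char) : ∀ (ps : List (List Char)) (d : Nat),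
    ((pvGcut t ps d : Nat) : Int) =
      ((ps.map (fun p => PySem.Chars.find t p)).filter (fun i => i != -1)).foldl min (d : Int) := by
  intro ps
  induction ps with
  | nil => intro d; rfl
  | cons p ps ih =>
    intro d
    simp only [pvGcut, List.foldl_cons, List.map_cons] at *
    by_cases h0 : 0 ≤ PySem.Chars.find t p
    · have hne : (PySem.Chars.find t p != -1) = true := by simp; omega
      have hfc : List.filter (fun i => i != -1)
          (PySem.Chars.find t p :: List.map (fun p => PySem.Chars.find t p) ps)
          = PySem.Chars.find t p :: List.filter (fun i => i != -1) (List.map (fun p => PySem.Chars.find t p) ps) := by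
        simp [hne]
      rw [if_pos h0, hfc, List.foldl_cons, ih]
      congr 1
      rw [Nat.cast_min, Int.toNat_of_nonneg h0]
    · have heq : PySem.Chars.find t p = -1 := by
        have := PySem.Chars.neg_one_le_find t p; omega
      have hfc : List.filter (fun i => i != -1)
          (PySem.Chars.find t p :: List.map (fun p => PySem.Chars.find t p) ps)
          = List.filter (fun i => i != -1) (List.map (fun p => PySem.Chars.find t p) ps) := by
        simp [heq]
      rw [if_neg h0, hfc]
      exact ih d

-- min(xs, default=d) is the fold from d when every element is ≤ d
lemma pvFoldl_min_minD (l : List Int) (d : Int) (h : ∀ y ∈ l, y ≤ d) :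
    l.foldl min d = PySem.List.minD l (fun i => i) d := by
  cases l with
  | nil => rfl
  | cons x xs =>
    have hx : x ≤ d := h x (by simp)
    simp only [PySem.List.minD, PySem.List.min?_id_cons, Option.getD_some, List.foldl_cons]
    rw [min_eq_right hx]

-- bridge: A's String-level loop is the list-level loop
lemma pvFoldA_toList : ∀ (ps : List String) (s : String),
    (ps.foldl (fun t platform =>
      let index := PySem.Str.find t platform
      if index ≠ -1 then PySem.Str.slice t none (some index) else t) s).toList
    = (ps.map String.toList).foldl pvStepL s.toList := by
  intro ps
  induction ps with
  | nil => intro s; rfl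
  | cons p ps ih =>
    intro s
    rw [List.foldl_cons, List.map_cons, List.foldl_cons, ih]
    congr 1
    simp only [pvStepL, PySem.Str.find_eq]
    split_ifs with hc
    · simp [PySem.Str.toList_slice]
    · rfl

-- ===== VERDICT (by name: the statement is the Claim_ definition above) =====
theorem delete_platform_info_spec : Claim_equal_delete_platform_info := by
  intro title _
  unfold Spec_delete_platform_info delete_platform_info delete_platform_info_alt
  apply String.toList_inj.mp
  rw [PySem.Str.toList_strip, PySem.Str.toList_strip]
  apply congrArg
  have hNoOvDec : ∀ a ∈ pvPlatforms.map String.toList, ∀ b ∈ pvPlatforms.map String.toList,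
      2 ≤ b.length ∧ pvOvOk a b = true := by decide
  have hNoOv : ∀ a ∈ pvPlatforms.map String.toList, ∀ b ∈ pvPlatforms.map String.toList, pvNoOv a b :=
    fun a ha b hb => pvNoOv_of a b (hNoOvDec a ha b hb).1 (hNoOvDec a ha b hb).2
  rw [pvFoldA_toList, pvFoldA_eq_take _ _ hNoOv]
  -- B side
  have hcuts : (pvPlatformsAlt.map (fun p => PySem.Str.find title p)).filter (fun i => i != -1)
      = ((pvPlatforms.map String.toList).map (fun p => PySem.Chars.find title.toList p)).filter (fun i => i != -1) := by
    simp [pvPlatformsAlt, pvPlatforms, PySem.Str.find_eq]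
  have hbound : ∀ y ∈ ((pvPlatforms.map String.toList).map (fun p => PySem.Chars.find title.toList p)).filter (fun i => i != -1),
      y ≤ (title.toList.length : Int) := by
    intro y hy
    obtain ⟨p, -, rfl⟩ := List.mem_map.mp (List.mem_of_mem_filter hy)
    exact PySem.Chars.find_le_length _ _
  rw [PySem.Str.toList_slice, PySem.Chars.slice_eq_listSlice, hcuts, PySem.Str.len_eq]
  rw [← pvFoldl_min_minD _ _ hbound, ← pvGcut_foldl_min]
  rw [PySem.List.slice_to _ (by positivity), Int.toNat_natCast]
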